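-- pv_equiv track=rewrite | github.com/Anamikarai12/Leetcodedailyquestion | SeparateDigit.py | separateDigits
-- ===== SOURCE A (Python) =====
-- def separateDigits(nums):
--     """
--     :type nums: List[int]
--     :rtype: List[int]
--     """
--
--     b=''
--     for i in nums:
--         b+=str(i)
--     c=[]
--     for i in b:
--         c.append(int(i))
--     return c
-- ===== SOURCE B (Python) =====
-- def separateDigits(nums):
--     res = []
--     for n in nums:
--         if n == 0:
--             res.append(0)
--             continue
--         tmp = []
--         while n:
--             tmp.append(n % 10)
--             n //= 10
--         res.extend(reversed(tmp))
--     return res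
-- ===== Notes on version B (the rewrite author's own statement) =====
-- stated objective: alternative
-- what changed: Digits are extracted arithmetically (repeated %10 and //10 per number, then reversed) instead of concatenating str() representations and re-parsing each character with int().
import Mathlib
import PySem

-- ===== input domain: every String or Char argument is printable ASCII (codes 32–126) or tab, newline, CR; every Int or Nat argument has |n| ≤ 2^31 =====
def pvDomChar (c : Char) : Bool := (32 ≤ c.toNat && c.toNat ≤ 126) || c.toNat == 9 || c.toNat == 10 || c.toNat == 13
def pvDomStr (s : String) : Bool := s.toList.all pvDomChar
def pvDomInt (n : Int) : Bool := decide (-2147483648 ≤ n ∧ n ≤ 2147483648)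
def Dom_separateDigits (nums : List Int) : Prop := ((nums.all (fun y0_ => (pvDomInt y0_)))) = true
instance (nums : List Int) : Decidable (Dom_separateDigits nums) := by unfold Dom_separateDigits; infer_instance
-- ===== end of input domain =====

-- B changes the algorithm: per-number arithmetic digit extraction (%10, //10, reverse) instead of
-- string concatenation and per-character int() parsing; equivalence proved on nonnegative inputs.

-- ===== PORT A =====
-- int(ch) for one character; none (Python: ValueError, e.g. on '-') is excluded by Pre_, getD 0 is never used there
def aIntOfChar (ch : Char) : Int := (PySem.Int.ofChars? [ch]).getD 0

def separateDigits (nums : List Int) : List Int :=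
  let b := nums.foldl (fun b i => b ++ PySem.Int.toChars i) []
  b.foldl (fun c ch => c ++ [aIntOfChar ch]) []

-- ===== PORT B =====
-- the while loop: collect n%10 and n//=10 until n == 0 (digits least-significant first)
def altDigitsRev (n : Int) : List Int :=
  if _h : n ≤ 0 then []
  else PySem.Int.mod n 10 :: altDigitsRev (PySem.Int.floordiv n 10)
termination_by n.toNat
decreasing_by
  
  have : PySem.Int.floordiv n 10 = n / 10 := PySem.Int.floordiv_eq_ediv_of_pos (by omega)
  rw [this]
  omega

def separateDigits_alt (nums : List Int) : List Int :=
  nums.foldl (fun res n =>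
    if n = 0 then res ++ [0] else res ++ (altDigitsRev n).reverse) []

-- ===== PRECONDITION & SPEC =====
-- Pre_ excludes lists containing a negative number: there A raises ValueError (int('-')).
def Pre_separateDigits (nums : List Int) : Prop := (nums.all (fun n => decide (0 ≤ n))) = true
instance (nums : List Int) : Decidable (Pre_separateDigits nums) := by unfold Pre_separateDigits; infer_instance
def pvWitness_separateDigits : List Int := [0, 123, 9, 40]

def Spec_separateDigits (nums : List Int) (out : List Int) : Prop := out = separateDigits_alt nums
instance (nums : List Int) (out : List Int) : Decidable (Spec_separateDigits nums out) := by unfold Spec_separateDigits; infer_instance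

-- ===== CLAIM (what is proved, stated in full; the proofs are below) =====
def Claim_equal_separateDigits : Prop := ∀ (nums : List Int), Dom_separateDigits nums → Pre_separateDigits nums → Spec_separateDigits nums (separateDigits nums)

-- ===== LEMMAS AND PROOFS =====

theorem aIntOfChar_digitChar (r : Nat) (h : r < 10) :
    aIntOfChar (Nat.digitChar r) = (r : Int) := by
  interval_cases r <;> decide

theorem altDigitsRev_nonpos (n : Int) (h : n ≤ 0) : altDigitsRev n = [] := by
  rw [altDigitsRev]; simp [h]

theorem altDigitsRev_pos (n : Int) (h : 0 < n) :
    altDigitsRev n = PySem.Int.mod n 10 :: altDigitsRev (PySem.Int.floordiv n 10) := by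
  rw [altDigitsRev]; simp [show ¬ n ≤ 0 by omega]

theorem map_toDigitsCore (fuel : Nat) : ∀ (m : Nat) (ds : List Char), m < fuel → 0 < m →
    (Nat.toDigitsCore 10 fuel m ds).map aIntOfChar
      = (altDigitsRev (m : Int)).reverse ++ ds.map aIntOfChar := by
  induction fuel with
  | zero => intro m ds h; omega
  | succ k ih =>
    intro m ds h hm
    have hmod : PySem.Int.mod (m : Int) 10 = ((m % 10 : Nat) : Int) := by
      exact_mod_cast PySem.Int.mod_natCast m 10
    have hdiv : PySem.Int.floordiv (m : Int) 10 = ((m / 10 : Nat) : Int) := by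
      exact_mod_cast PySem.Int.floordiv_natCast m 10
    rw [altDigitsRev_pos _ (by exact_mod_cast hm), hmod, hdiv]
    simp only [Nat.toDigitsCore]
    by_cases hq : m / 10 = 0
    · simp [hq, altDigitsRev_nonpos, aIntOfChar_digitChar (m % 10) (by omega)]
    · rw [if_neg hq, ih (m / 10) _ (by omega) (by omega)]
      simp [aIntOfChar_digitChar (m % 10) (by omega)]

theorem map_toChars (n : Int) (h : 0 ≤ n) :
    (PySem.Int.toChars n).map aIntOfChar
      = if n = 0 then [0] else (altDigitsRev n).reverse := by
  by_cases h0 : n = 0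
  · subst h0; decide
  · have hp : 0 < n := by omega
    rw [if_neg h0]
    have hn : (n.toNat : Int) = n := Int.toNat_of_nonneg h
    unfold PySem.Int.toChars Nat.toDigits
    rw [if_neg (by omega)]
    rw [map_toDigitsCore (n.toNat + 1) n.toNat [] (by omega) (by omega)]
    simp [hn]

theorem foldl_app_charloop (b : List Char) : ∀ (acc : List Int),
    b.foldl (fun c ch => c ++ [aIntOfChar ch]) acc = acc ++ b.map aIntOfChar := by
  induction b with
  | nil => simp
  | cons x xs ih => intro acc; simp [List.foldl, ih]

theorem foldl_app_strbuild (nums : List Int) : ∀ (acc : List Char),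
    nums.foldl (fun b i => b ++ PySem.Int.toChars i) acc
      = acc ++ nums.flatMap PySem.Int.toChars := by
  induction nums with
  | nil => simp
  | cons x xs ih => intro acc; simp [List.foldl, ih]

theorem foldl_app_alt (nums : List Int) : ∀ (acc : List Int),
    nums.foldl (fun res n => if n = 0 then res ++ [0] else res ++ (altDigitsRev n).reverse) acc
      = acc ++ nums.flatMap (fun n => if n = 0 then [0] else (altDigitsRev n).reverse) := by
  induction nums with
  | nil => simp
  | cons x xs ih =>
    intro acc
    by_cases h0 : x = 0 <;> simp [List.foldl, ih, h0]

-- ===== VERDICT (by name: the statement is the Claim_ definition above) =====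
theorem separateDigits_spec : Claim_equal_separateDigits := by
  intro nums _ hpre
  unfold Spec_separateDigits separateDigits separateDigits_alt
  rw [foldl_app_strbuild, foldl_app_charloop, foldl_app_alt]
  simp only [List.nil_append, List.map_flatMap]
  apply List.flatMap_congr
  intro n hn
  have h0 : 0 ≤ n := by
    unfold Pre_separateDigits at hpre
    simp [List.all_eq_true] at hpre
    exact hpre n hn
  exact map_toChars n h0
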